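-- pv_equiv track=rewrite | github.com/nlscng/ubiquitous-octo-robot | p000/problem-35/SortRGB.py | sort_rgb
-- ===== SOURCE A (Python) =====
-- def sort_rgb(liz: list):
--     if not isinstance(liz, list):
--         raise Exception('Expected an list or array, got {} instead.'.format(type(liz)))
--     if not liz:
--         return []
--     if any([x != 'R' and x != 'G' and x != 'B' for x in liz]):
--         raise Exception('Expected members to be strictly "R", "G", or "B", but found others.')
--
--     toll = {'R': liz.count('R'), 'G': liz.count('G'), 'B': liz.count('B')}
--
--     for i in range(len(liz)):
--         if i < toll['R']:
--             liz[i] = 'R'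
--         elif i < toll['R'] + toll['G']:
--             liz[i] = 'G'
--         else:
--             liz[i] = 'B'
--
--     return liz
-- ===== SOURCE B (Python) =====
-- def sort_rgb(liz: list):
--     if not isinstance(liz, list):
--         raise Exception('Expected an list or array, got {} instead.'.format(type(liz)))
--     if not liz:
--         return []
--     if any([x != 'R' and x != 'G' and x != 'B' for x in liz]):
--         raise Exception('Expected members to be strictly "R", "G", or "B", but found others.')
--     liz.sort(key="RGB".index)
--     return liz
-- ===== Notes on version B (the rewrite author's own statement) =====
-- stated objective: idiomatic
-- what changed: The hand-rolled counting sort (three count() passes plus an index-rewrite loop) is replaced by the standard-library stable sort with key="RGB".index, i.e. comparison sorting by colour rank instead of counting and overwriting.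
import Mathlib
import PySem

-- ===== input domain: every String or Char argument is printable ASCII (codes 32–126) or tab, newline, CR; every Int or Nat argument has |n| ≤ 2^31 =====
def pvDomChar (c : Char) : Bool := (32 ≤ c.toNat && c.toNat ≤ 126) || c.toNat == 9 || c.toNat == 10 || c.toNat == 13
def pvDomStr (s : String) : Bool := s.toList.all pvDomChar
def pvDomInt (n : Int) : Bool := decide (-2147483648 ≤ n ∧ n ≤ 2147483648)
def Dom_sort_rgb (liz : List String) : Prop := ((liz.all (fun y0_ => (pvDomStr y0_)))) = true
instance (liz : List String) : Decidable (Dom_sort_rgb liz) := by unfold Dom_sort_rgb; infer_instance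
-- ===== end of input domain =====

-- B replaces A's hand-rolled counting sort (count dict + index-rewrite loop) by the idiomatic
-- stable library sort with key "RGB".index; both Pythons mutate liz in place — the equivalence
-- proved here is about the return value.

-- ===== PORT A =====
def sort_rgb (liz : List String) : List String :=
  if liz = [] then []
  else if liz.any (fun x => x != "R" && x != "G" && x != "B") then liz
    -- Python raises Exception on this branch; these inputs are excluded by Pre_sort_rgb
  else
    let tollR : Int := PySem.List.count liz "R"
    let tollG : Int := PySem.List.count liz "G"
    let _tollB : Int := PySem.List.count liz "B"  -- computed by A, never read by its loop
    (PySem.List.pyRange 0 liz.length 1).foldl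
      (fun acc i =>
        if i < tollR then PySem.List.pySetD acc i "R"
        else if i < tollR + tollG then PySem.List.pySetD acc i "G"
        else PySem.List.pySetD acc i "B") liz

-- ===== PORT B =====
-- "RGB".index(x): under Pre_ every x occurs in "RGB", where Str.find agrees with str.index
def sort_rgb_alt (liz : List String) : List String :=
  if liz = [] then []
  else if liz.any (fun x => x != "R" && x != "G" && x != "B") then liz
    -- Python raises Exception on this branch; these inputs are excluded by Pre_sort_rgb
  else PySem.List.sorted liz (fun s => PySem.Str.find "RGB" s) false

-- ===== PRECONDITION & SPEC =====
-- Pre_ excludes exactly the inputs on which Python A raises: a member other than "R"/"G"/"B".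
def Pre_sort_rgb (liz : List String) : Prop :=
  ∀ x ∈ liz, x = "R" ∨ x = "G" ∨ x = "B"
instance (liz : List String) : Decidable (Pre_sort_rgb liz) := by
  unfold Pre_sort_rgb; infer_instance
def pvWitness_sort_rgb : List String := ["G", "B", "R", "G"]
def Spec_sort_rgb (liz : List String) (out : List String) : Prop := out = sort_rgb_alt liz
instance (liz : List String) (out : List String) : Decidable (Spec_sort_rgb liz out) := by
  unfold Spec_sort_rgb; infer_instance

-- ===== CLAIM (what is proved, stated in full; the proofs are below) =====
def Claim_equal_sort_rgb : Prop :=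
  ∀ (liz : List String), Dom_sort_rgb liz → Pre_sort_rgb liz → Spec_sort_rgb liz (sort_rgb liz)

-- ===== LEMMAS AND PROOFS =====

-- the sorted value both algorithms produce: r R's, then g G's, then b B's
def canonRGB (r g b : Nat) : List String :=
  List.replicate r "R" ++ List.replicate g "G" ++ List.replicate b "B"

-- the colour A's fill loop writes at position k
def fillAt (r g : Nat) (k : Nat) : String :=
  if k < r then "R" else if k < r + g then "G" else "B"

-- the comparison B's stable insertion sort uses
def befRGB (a b : String) : Bool :=
  decide (PySem.Str.find "RGB" a < PySem.Str.find "RGB" b)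

lemma bef_RR : befRGB "R" "R" = false := by decide
lemma bef_RG : befRGB "R" "G" = true := by decide
lemma bef_RB : befRGB "R" "B" = true := by decide
lemma bef_GG : befRGB "G" "G" = false := by decide
lemma bef_GB : befRGB "G" "B" = true := by decide
lemma bef_BB : befRGB "B" "B" = false := by decide
lemma bef_GR : befRGB "G" "R" = false := by decide
lemma bef_BR : befRGB "B" "R" = false := by decide
lemma bef_BG : befRGB "B" "G" = false := by decide

lemma insertBy_R (a g b : Nat) :
    PySem.List.insertBy befRGB "R" (canonRGB a g b) = canonRGB (a + 1) g b := by
  induction a with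
  | zero =>
    cases g with
    | zero =>
      cases b with
      | zero => rfl
      | succ b =>
        simp [canonRGB, List.replicate_succ, PySem.List.insertBy, bef_RB]
    | succ g =>
      simp [canonRGB, List.replicate_succ, PySem.List.insertBy, bef_RG]
  | succ a ih =>
    simpa [canonRGB, List.replicate_succ, PySem.List.insertBy, bef_RR] using ih

lemma insertBy_G (a g b : Nat) :
    PySem.List.insertBy befRGB "G" (canonRGB a g b) = canonRGB a (g + 1) b := by
  induction a with
  | zero =>
    induction g with
    | zero =>
      cases b with
      | zero => rfl
      | succ b =>
        simp [canonRGB, List.replicate_succ, PySem.List.insertBy, bef_GB]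
    | succ g ihg =>
      simpa [canonRGB, List.replicate_succ, PySem.List.insertBy, bef_GG] using ihg
  | succ a ih =>
    simpa [canonRGB, List.replicate_succ, PySem.List.insertBy, bef_GR] using ih

lemma insertBy_B (a g b : Nat) :
    PySem.List.insertBy befRGB "B" (canonRGB a g b) = canonRGB a g (b + 1) := by
  induction a with
  | zero =>
    induction g with
    | zero =>
      induction b with
      | zero => rfl
      | succ b ihb =>
        simpa [canonRGB, List.replicate_succ, PySem.List.insertBy, bef_BB] using ihb
    | succ g ihg =>
      simpa [canonRGB, List.replicate_succ, PySem.List.insertBy, bef_BG] using ihg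
  | succ a ih =>
    simpa [canonRGB, List.replicate_succ, PySem.List.insertBy, bef_BR] using ih

lemma canon_congr {r r' g g' b b' : Nat} (h1 : r = r') (h2 : g = g') (h3 : b = b') :
    canonRGB r g b = canonRGB r' g' b' := by rw [h1, h2, h3]

-- B's insertion-sort fold, characterised on RGB lists
lemma foldl_insertBy_canon (xs : List String)
    (h : ∀ x ∈ xs, x = "R" ∨ x = "G" ∨ x = "B") :
    ∀ a g b, xs.foldl (fun acc x => PySem.List.insertBy befRGB x acc) (canonRGB a g b)
      = canonRGB (a + xs.count "R") (g + xs.count "G") (b + xs.count "B") := by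
  induction xs with
  | nil => intro a g b; simp
  | cons x xs ih =>
    intro a g b
    have hx := h x (List.mem_cons_self ..)
    have htail : ∀ y ∈ xs, y = "R" ∨ y = "G" ∨ y = "B" :=
      fun y hy => h y (List.mem_cons_of_mem _ hy)
    rcases hx with rfl | rfl | rfl
    · rw [List.foldl_cons, insertBy_R, ih htail]
      exact canon_congr (by simp; omega) (by simp) (by simp)
    · rw [List.foldl_cons, insertBy_G, ih htail]
      exact canon_congr (by simp) (by simp; omega) (by simp)
    · rw [List.foldl_cons, insertBy_B, ih htail]
      exact canon_congr (by simp) (by simp) (by simp; omega)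

-- counts add up to the length on RGB lists
lemma counts_sum (xs : List String) (h : ∀ x ∈ xs, x = "R" ∨ x = "G" ∨ x = "B") :
    xs.count "R" + xs.count "G" + xs.count "B" = xs.length := by
  induction xs with
  | nil => simp
  | cons x xs ih =>
    have hx := h x (List.mem_cons_self ..)
    have ih' := ih (fun y hy => h y (List.mem_cons_of_mem _ hy))
    rcases hx with rfl | rfl | rfl <;> simp <;> omega

lemma take_set_succ (ys : List String) (k : Nat) (v : String) (h : k < ys.length) :
    (ys.set k v).take (k + 1) = ys.take k ++ [v] := by
  rw [List.set_eq_take_append_cons_drop, if_pos h]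
  have hl : (ys.take k).length = k := by simp [Nat.min_eq_left h.le]
  rw [List.take_append, hl]
  rw [List.take_of_length_le (by omega : (ys.take k).length ≤ k + 1)]
  simp

-- A's index-rewrite loop, characterised
lemma fill_fold (f : Nat → String) :
    ∀ (m : Nat) (ys : List String) (k : Nat), k + m = ys.length →
      (PySem.List.pyRange k ys.length 1).foldl
          (fun acc i => PySem.List.pySetD acc i (f i.toNat)) ys
        = ys.take k ++ (List.range' k m).map f := by
  intro m
  induction m with
  | zero =>
    intro ys k hk
    rw [show PySem.List.pyRange (k : Int) (ys.length : Int) 1 = [] from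
      PySem.List.pyRange_one_eq_nil (by omega)]
    rw [List.foldl_nil, List.range'_zero, List.map_nil, List.append_nil]
    exact (List.take_of_length_le (by omega)).symm
  | succ m ih =>
    intro ys k hk
    rw [show PySem.List.pyRange (k : Int) (ys.length : Int) 1
          = (k : Int) :: PySem.List.pyRange ((k : Int) + 1) (ys.length : Int) 1 from
      PySem.List.pyRange_one_cons (by omega)]
    rw [List.foldl_cons]
    have hset : PySem.List.pySetD ys (k : Int) (f ((k : Int).toNat)) = ys.set k (f k) := by
      simp [PySem.List.pySetD_natCast]
    rw [hset]
    have hlen : (ys.set k (f k)).length = ys.length := by simp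
    have hrange : ((k : Int) + 1) = ((k + 1 : Nat) : Int) := by push_cast; ring
    have hih := ih (ys.set k (f k)) (k + 1) (by omega)
    rw [hlen] at hih
    rw [hrange, hih, take_set_succ ys k (f k) (by omega)]
    rw [List.range'_succ, List.map_cons]
    simp

-- the filled list IS the canonical sorted list
lemma map_range_fill (r g b : Nat) :
    (List.range (r + g + b)).map (fillAt r g) = canonRGB r g b := by
  apply List.ext_getElem
  · simp [canonRGB]; omega
  · intro i h1 h2
    simp only [List.length_map, List.length_range] at h1
    simp only [List.getElem_map, List.getElem_range]
    unfold canonRGB fillAt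
    by_cases c1 : i < r
    · rw [if_pos c1,
        List.getElem_append_left (by simp; omega),
        List.getElem_append_left (by simp; omega),
        List.getElem_replicate]
    · rw [if_neg c1]
      by_cases c2 : i < r + g
      · rw [if_pos c2,
          List.getElem_append_left (by simp; omega),
          List.getElem_append_right (by simp; omega),
          List.getElem_replicate]
      · rw [if_neg c2,
          List.getElem_append_right (by simp; omega),
          List.getElem_replicate]

-- ===== VERDICT (by name: the statement is the Claim_ definition above) =====
theorem sort_rgb_spec : Claim_equal_sort_rgb := by
  unfold Claim_equal_sort_rgb
  intro liz _hdom hpre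
  unfold Spec_sort_rgb sort_rgb sort_rgb_alt
  by_cases hnil : liz = []
  · simp [hnil]
  · have hany : liz.any (fun x => x != "R" && x != "G" && x != "B") = false := by
      rw [List.any_eq_false]
      intro x hx
      rcases hpre x hx with rfl | rfl | rfl <;> decide
    simp only [hnil, hany, Bool.false_eq_true, if_false]
    set r := liz.count "R" with hr
    set g := liz.count "G" with hg
    set b := liz.count "B" with hb
    have hsum : r + g + b = liz.length := counts_sum liz hpre
    -- A side
    have hA :
        (PySem.List.pyRange 0 liz.length 1).foldl
          (fun acc i =>
            if i < ((PySem.List.count liz "R" : Nat) : Int) then PySem.List.pySetD acc i "R"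
            else if i < ((PySem.List.count liz "R" : Nat) : Int) + ((PySem.List.count liz "G" : Nat) : Int) then PySem.List.pySetD acc i "G"
            else PySem.List.pySetD acc i "B") liz
        = canonRGB r g b := by
      have hcnt : PySem.List.count liz "R" = r ∧ PySem.List.count liz "G" = g := by
        constructor <;> simp [PySem.List.count_eq, hr, hg]
      have hstep : (PySem.List.pyRange 0 liz.length 1).foldl
          (fun acc i =>
            if i < ((PySem.List.count liz "R" : Nat) : Int) then PySem.List.pySetD acc i "R"
            else if i < ((PySem.List.count liz "R" : Nat) : Int) + ((PySem.List.count liz "G" : Nat) : Int) then PySem.List.pySetD acc i "G"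
            else PySem.List.pySetD acc i "B") liz
          = (PySem.List.pyRange 0 liz.length 1).foldl
          (fun acc i => PySem.List.pySetD acc i (fillAt r g i.toNat)) liz := by
        apply PySem.List.foldl_congr_mem
        intro acc i hi
        rw [PySem.List.mem_pyRange_one] at hi
        rw [hcnt.1, hcnt.2]
        unfold fillAt
        by_cases h1 : i.toNat < r
        · rw [if_pos h1, if_pos (by omega)]
        · rw [if_neg h1, if_neg (by omega)]
          by_cases h2 : i.toNat < r + g
          · rw [if_pos h2, if_pos (by omega)]
          · rw [if_neg h2, if_neg (by omega)]
      rw [hstep]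
      have hff := fill_fold (fillAt r g) liz.length liz 0 (by omega)
      simp only [Nat.cast_zero] at hff
      rw [hff]
      rw [List.take_zero, List.nil_append, ← List.range_eq_range']
      rw [← hsum, map_range_fill]
    rw [hA]
    -- B side
    rw [PySem.List.sorted_eq_foldl_insertBy]
    have hB := foldl_insertBy_canon liz hpre 0 0 0
    simp only [Nat.zero_add] at hB
    calc canonRGB r g b
        = canonRGB (0 + r) (0 + g) (0 + b) := by simp
      _ = liz.foldl (fun acc x => PySem.List.insertBy befRGB x acc) (canonRGB 0 0 0) := by
            rw [foldl_insertBy_canon liz hpre 0 0 0]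
      _ = liz.foldl (fun acc x =>
            PySem.List.insertBy (fun a b => decide (PySem.Str.find "RGB" a < PySem.Str.find "RGB" b)) x acc) [] := by
            rfl
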